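-- pv_equiv track=rewrite | github.com/kdh610/CodingTest | 프로그래머스/1/82612. 부족한 금액 계산하기/부족한 금액 계산하기.py | solution
-- ===== SOURCE A (Python) =====
-- def solution(price, money, count):
--     answer = 0
--
--     p = 0
--     for i in range(1,count+1):
--         p+= price*i
--
--     if p>money:
--         answer=p-money
--
--     return answer
-- ===== SOURCE B (Python) =====
-- def solution(price, money, count):
--     total = price * count * (count + 1) // 2 if count > 0 else 0
--     return max(0, total - money)
-- ===== Notes on version B (the rewrite author's own statement) =====
-- stated objective: faster
-- what changed: Replaces the O(count) loop summing price*i with the closed-form arithmetic-series formula price*count*(count+1)//2 and a max with 0.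
import Mathlib
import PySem

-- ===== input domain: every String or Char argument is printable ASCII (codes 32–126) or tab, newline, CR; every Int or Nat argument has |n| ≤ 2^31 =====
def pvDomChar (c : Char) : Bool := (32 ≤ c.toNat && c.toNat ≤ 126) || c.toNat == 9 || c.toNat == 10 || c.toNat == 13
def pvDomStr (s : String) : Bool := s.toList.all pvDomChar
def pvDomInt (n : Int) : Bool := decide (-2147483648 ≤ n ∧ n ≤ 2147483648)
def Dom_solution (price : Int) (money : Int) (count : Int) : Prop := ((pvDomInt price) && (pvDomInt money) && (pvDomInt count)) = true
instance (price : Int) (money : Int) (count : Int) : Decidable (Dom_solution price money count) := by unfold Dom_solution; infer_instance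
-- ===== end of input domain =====

-- ===== PORT A =====
-- B replaces A's O(count) summation loop by the closed-form series formula (faster, asymptotic).
def solution (price : Int) (money : Int) (count : Int) : Int :=
  -- answer = 0; p = 0; for i in range(1, count+1): p += price*i
  let answer : Int := 0
  let p : Int := (PySem.List.pyRange 1 (count + 1) 1).foldl (fun p i => p + price * i) 0
  -- if p > money: answer = p - money
  let answer := if p > money then p - money else answer
  answer

-- ===== PORT B =====
def solution_alt (price : Int) (money : Int) (count : Int) : Int :=
  let total : Int := if count > 0 then PySem.Int.floordiv (price * count * (count + 1)) 2 else 0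
  max 0 (total - money)

-- ===== PRECONDITION & SPEC =====
def Spec_solution (price : Int) (money : Int) (count : Int) (out : Int) : Prop := out = solution_alt price money count
instance (price : Int) (money : Int) (count : Int) (out : Int) : Decidable (Spec_solution price money count out) := by unfold Spec_solution; infer_instance

-- ===== CLAIM (what is proved, stated in full; the proofs are below) =====
def Claim_equal_solution : Prop := ∀ (price : Int) (money : Int) (count : Int), Dom_solution price money count → Spec_solution price money count (solution price money count)

-- ===== LEMMAS AND PROOFS =====
-- Twice the loop's sum is price*n*(n+1), by induction on the upper bound.
theorem pv_two_mul_sum (price : Int) (n : Nat) :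
    2 * (PySem.List.pyRange 1 ((n : Int) + 1) 1).foldl (fun p i => p + price * i) 0
      = price * (n : Int) * ((n : Int) + 1) := by
  induction n with
  | zero => simp [PySem.List.pyRange_one_eq_nil]
  | succ k ih =>
      rw [show ((k + 1 : Nat) : Int) + 1 = ((k : Int) + 1) + 1 by push_cast; ring,
          PySem.List.pyRange_one_succ_right (by omega)]
      rw [List.foldl_append]
      simp only [List.foldl]
      push_cast
      rw [mul_add, ih]
      ring

-- The loop's sum equals the closed form (for count > 0, floor division is exact).
theorem pv_sum_closed (price count : Int) (hc : 0 < count) :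
    (PySem.List.pyRange 1 (count + 1) 1).foldl (fun p i => p + price * i) 0
      = PySem.Int.floordiv (price * count * (count + 1)) 2 := by
  obtain ⟨n, rfl⟩ : ∃ n : Nat, count = (n : Int) := ⟨count.toNat, (Int.toNat_of_nonneg hc.le).symm⟩
  rw [PySem.Int.floordiv_eq_ediv_of_pos (by norm_num), ← pv_two_mul_sum price n,
      Int.mul_ediv_cancel_left _ (by norm_num)]

-- ===== VERDICT (by name: the statement is the Claim_ definition above) =====
theorem solution_spec : Claim_equal_solution := by
  intro price money count _
  unfold Spec_solution solution solution_alt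
  dsimp only
  by_cases hc : 0 < count
  · rw [pv_sum_closed price count hc, if_pos hc]
    omega
  · rw [PySem.List.pyRange_one_eq_nil (by omega)]
    simp only [List.foldl_nil, if_neg hc]
    omega
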